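-- pv_equiv track=rewrite | github.com/MateoBaldassi/G-AIA-910_Computer_Vision | scripts/prepare_processed_data.py | _resolve_label
-- ===== SOURCE A (Python) =====
-- from collections import defaultdict
--
-- def _resolve_label(preds: list[int], consensus_only: bool) -> tuple[int | None, bool]:
--     """
--     Resolve a final class label from multiple predictions.
--
--     Returns
--     -------
--     label, agreed
--       label is None if no reliable label can be assigned.
--     """
--     valid = [p for p in preds if isinstance(p, int) and 0 <= p <= 9]
--     if not valid:
--         return None, False
--
--     agreed = len(set(valid)) == 1
--     if agreed:
--         return valid[0], True
--
--     if consensus_only: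
--         return None, False
--
--     # Majority vote fallback
--     counts = defaultdict(int)
--     for p in valid:
--         counts[p] += 1
--     best = sorted(counts.items(), key=lambda kv: (-kv[1], kv[0]))[0][0]
--     return best, False
-- ===== SOURCE B (Python) =====
-- def _resolve_label(preds: list[int], consensus_only: bool) -> tuple[int | None, bool]:
--     # Sort the valid digits and scan runs of equal values: the longest run is the
--     # majority label; ties keep the earlier (smaller) label; a run covering the
--     # whole list means unanimous agreement.
--     valid = sorted(p for p in preds if isinstance(p, int) and 0 <= p <= 9)
--     if not valid:
--         return None, False
--     best, best_run = valid[0], 0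
--     run, prev = 0, None
--     for p in valid:
--         run = run + 1 if p == prev else 1
--         if run > best_run:
--             best, best_run = p, run
--         prev = p
--     if best_run == len(valid):
--         return best, True
--     if consensus_only:
--         return None, False
--     return best, False
-- ===== Notes on version B (the rewrite author's own statement) =====
-- stated objective: alternative
-- what changed: B replaces A's hash-count-then-sort-items scheme by sort-then-scan: it sorts the valid digits and sweeps once over runs of equal values, keeping the longest run (first on ties, i.e. smallest label) as the majority label and reading unanimity off best_run == len(valid), so no set, no dict and no second sort are built.
import Mathlib
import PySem

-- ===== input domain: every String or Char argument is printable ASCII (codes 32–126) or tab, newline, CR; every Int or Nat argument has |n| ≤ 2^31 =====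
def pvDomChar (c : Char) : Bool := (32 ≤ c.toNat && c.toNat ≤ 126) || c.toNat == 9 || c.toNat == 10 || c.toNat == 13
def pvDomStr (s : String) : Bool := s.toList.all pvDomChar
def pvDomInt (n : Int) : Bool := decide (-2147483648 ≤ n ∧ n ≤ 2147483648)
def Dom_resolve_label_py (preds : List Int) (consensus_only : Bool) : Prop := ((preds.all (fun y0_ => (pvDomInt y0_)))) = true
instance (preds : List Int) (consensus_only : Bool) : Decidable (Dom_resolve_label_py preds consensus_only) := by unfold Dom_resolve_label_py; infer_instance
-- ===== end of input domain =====

-- B sorts the valid digits and scans runs of equal values instead of A's set test,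
-- hash counting and item sort; same results, no speed claim.

-- ===== PORT A =====
def resolve_label_py (preds : List Int) (consensus_only : Bool) : Option Int × Bool :=
  let valid := preds.filter (fun p => decide (0 ≤ p ∧ p ≤ 9))
  if valid = [] then (none, false)
  else
    let agreed := PySem.Set.len (PySem.Set.ofList valid) == 1
    if agreed then (PySem.List.pyGet? valid 0, true)
    else if consensus_only then (none, false)
    else
      let counts := valid.foldl (fun d p => PySem.Dict.modify d p 0 (· + 1)) PySem.Dict.empty
      ((PySem.List.pyGet?
          (PySem.List.sorted counts.items (fun kv => toLex ((-kv.2 : Int), kv.1))) 0).map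
        (fun kv => kv.1), false)

-- ===== PORT B =====
-- state = (best, best_run, run, prev), exactly the loop variables of Source B
def runStep (st : Int × Int × Int × Option Int) (p : Int) : Int × Int × Int × Option Int :=
  match st with
  | (best, bestRun, run, prev) =>
    let run' := if some p == prev then run + 1 else 1
    if bestRun < run' then (p, run', run', some p) else (best, bestRun, run', some p)

def resolve_label_py_alt (preds : List Int) (consensus_only : Bool) : Option Int × Bool :=
  let valid := PySem.List.sorted (preds.filter (fun p => decide (0 ≤ p ∧ p ≤ 9))) (fun x => x)
  match valid with
  | [] => (none, false)
  | v :: t =>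
    let st := (v :: t).foldl runStep (v, 0, 0, none)
    if st.2.1 == ((v :: t).length : Int) then (some st.1, true)
    else if consensus_only then (none, false)
    else (some st.1, false)

-- ===== PRECONDITION & SPEC =====
def Spec_resolve_label_py (preds : List Int) (consensus_only : Bool) (out : Option Int × Bool) : Prop := out = resolve_label_py_alt preds consensus_only
instance (preds : List Int) (consensus_only : Bool) (out : Option Int × Bool) : Decidable (Spec_resolve_label_py preds consensus_only out) := by unfold Spec_resolve_label_py; infer_instance

-- ===== CLAIM (what is proved, stated in full; the proofs are below) =====
def Claim_equal_resolve_label_py : Prop := ∀ (preds : List Int) (consensus_only : Bool), Dom_resolve_label_py preds consensus_only → Spec_resolve_label_py preds consensus_only (resolve_label_py preds consensus_only)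

-- ===== LEMMAS AND PROOFS =====

-- loop invariant of Source B's run scan over the processed (sorted) prefix u
def pvInv (u : List Int) (st : Int × Int × Int × Option Int) : Prop :=
  (u = [] → st.2.1 = 0 ∧ st.2.2.2 = none) ∧
  (u ≠ [] → ∃ prv, st.2.2.2 = some prv ∧ prv ∈ u ∧ (∀ x ∈ u, x ≤ prv) ∧
      st.2.2.1 = (u.count prv : Int) ∧
      st.1 ∈ u ∧ st.2.1 = (u.count st.1 : Int) ∧
      ∀ x ∈ u, (u.count x : Int) < st.2.1 ∨ ((u.count x : Int) = st.2.1 ∧ st.1 ≤ x))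

theorem pvCountAppend (u : List Int) (p x : Int) :
    ((u ++ [p]).count x : Int) = (u.count x : Int) + (if x = p then 1 else 0) := by
  rcases eq_or_ne x p with h | h
  · subst h; simp [List.count_append]
  · have h0 : ([p].count x) = 0 := List.count_eq_zero.mpr (by simp only [List.mem_singleton]; exact h)
    simp only [List.count_append, h0, if_neg h, add_zero, Nat.cast_add, Nat.cast_zero]

theorem pvStepInv (u : List Int) (p : Int) (st : Int × Int × Int × Option Int)
    (hle : ∀ x ∈ u, x ≤ p) (hinv : pvInv u st) : pvInv (u ++ [p]) (runStep st p) := by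
  obtain ⟨b, m, r, pr⟩ := st
  by_cases hu : u = []
  · subst hu
    obtain ⟨hm, hpr⟩ := hinv.1 rfl
    simp only at hm hpr
    subst hm; subst hpr
    refine ⟨by simp, fun _ => ⟨p, ?_⟩⟩
    simp [runStep, pvInv]
  · obtain ⟨prv, hpr, hprm, hub, hr, hbm, hm, hmax⟩ := hinv.2 hu
    simp only at hpr hr hbm hm hmax
    subst hpr
    have hubp : ∀ x ∈ u ++ [p], x ≤ p := by
      intro x hx
      rcases List.mem_append.mp hx with h | h
      · exact hle x h
      · simp at h; omega
    have hprvle : prv ≤ p := hle prv hprm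
    have hcnt1 : u.count b ≥ 1 := List.one_le_count_iff.mpr hbm
    by_cases hppr : p = prv
    · -- run of prv extends
      subst hppr
      have hc : (some p == some p) = true := by simp
      have hrun : ((u ++ [p]).count p : Int) = (u.count p : Int) + 1 := by
        rw [pvCountAppend]; simp
      by_cases hlt : m < r + 1
      · have hst : runStep (b, m, r, some p) p = (p, r + 1, r + 1, some p) := by
          simp [runStep, hc, hlt]
        rw [hst]
        refine ⟨by simp, fun _ => ⟨p, rfl, by simp, hubp, by simp only; omega,
          by simp, by simp only; omega, ?_⟩⟩
        intro x hx
        simp only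
        rw [pvCountAppend]
        by_cases hxp : x = p
        · subst hxp; right; simp; omega
        · left
          rcases List.mem_append.mp hx with h | h
          · have := hmax x h
            simp only [hxp, if_false, add_zero]
            omega
          · simp at h; exact absurd h hxp
      · have hst : runStep (b, m, r, some p) p = (b, m, r + 1, some p) := by
          simp [runStep, hc, hlt]
        rw [hst]
        have hbp : b ≠ p := by
          intro h; subst h; omega
        refine ⟨by simp, fun _ => ⟨p, rfl, by simp, hubp, by simp only; omega,
          by simp only; exact List.mem_append.mpr (Or.inl hbm), ?_, ?_⟩⟩
        · simp only
          rw [pvCountAppend]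
          simp [hbp, hm]
        · intro x hx
          simp only
          rw [pvCountAppend]
          by_cases hxp : x = p
          · subst hxp
            have hord : b ≤ x := hub b hbm
            simp only [if_pos rfl]
            omega
          · simp only [hxp, if_false, add_zero]
            rcases List.mem_append.mp hx with h | h
            · exact hmax x h
            · simp at h; exact absurd h hxp
    · -- new run of length 1
      have hc : (some p == some prv) = false := by simp [hppr]
      have hpnot : p ∉ u := by
        intro hmem
        exact hppr (le_antisymm (hub p hmem) hprvle)
      have hcz : u.count p = 0 := List.count_eq_zero.mpr hpnot
      have hlt : ¬ m < 1 := by omega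
      have hst : runStep (b, m, r, some prv) p = (b, m, 1, some p) := by
        simp [runStep, hc, hlt]
      rw [hst]
      have hbp : b ≠ p := fun h => hpnot (h ▸ hbm)
      refine ⟨by simp, fun _ => ⟨p, rfl, by simp, hubp, ?_,
        by simp only; exact List.mem_append.mpr (Or.inl hbm), ?_, ?_⟩⟩
      · simp only
        rw [pvCountAppend]
        simp [hcz]
      · simp only
        rw [pvCountAppend]
        simp [hbp, hm]
      · intro x hx
        simp only
        rw [pvCountAppend]
        by_cases hxp : x = p
        · subst hxp
          have hord : b ≤ x := le_trans (hub b hbm) hprvle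
          simp only [if_pos rfl, hcz]
          omega
        · simp only [hxp, if_false, add_zero]
          rcases List.mem_append.mp hx with h | h
          · exact hmax x h
          · simp at h; exact absurd h hxp

theorem pvFoldInv (r : List Int) : ∀ (u : List Int) (st : Int × Int × Int × Option Int),
    List.Pairwise (· ≤ ·) (u ++ r) → pvInv u st → pvInv (u ++ r) (r.foldl runStep st) := by
  induction r with
  | nil => intro u st _ h; simpa using h
  | cons p r' ih =>
    intro u st hpw hinv
    have hle : ∀ x ∈ u, x ≤ p := by
      have h := (List.pairwise_append.mp hpw).2.2
      exact fun x hx => h x hx p List.mem_cons_self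
    have h1 : pvInv (u ++ [p]) (runStep st p) := pvStepInv u p st hle hinv
    have hpw2 : List.Pairwise (· ≤ ·) ((u ++ [p]) ++ r') := by
      simpa [List.append_assoc] using hpw
    have := ih (u ++ [p]) (runStep st p) hpw2 h1
    simpa [List.append_assoc] using this

theorem pvPyGet0 {α : Type} (x : α) (l : List α) : PySem.List.pyGet? (x :: l) 0 = some x := by
  simp [PySem.List.pyGet?, PySem.List.pyIdx?]

-- ===== VERDICT (by name: the statement is the Claim_ definition above) =====
theorem resolve_label_py_spec : Claim_equal_resolve_label_py := by
  intro preds co _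
  show resolve_label_py preds co = resolve_label_py_alt preds co
  simp only [resolve_label_py, resolve_label_py_alt]
  set valid := preds.filter (fun p => decide (0 ≤ p ∧ p ≤ 9)) with hvalid
  set s := PySem.List.sorted valid (fun x => x) with hs
  by_cases hv : valid = []
  · have hsnil : s = [] := by rw [hs, PySem.List.sorted_eq_nil_iff]; exact hv
    rw [hv, hsnil]
    cases co <;> decide
  · have hsne : s ≠ [] := by
      rw [hs, Ne, PySem.List.sorted_eq_nil_iff]; exact hv
    obtain ⟨v, t, hvt⟩ := List.exists_cons_of_ne_nil hsne
    have hperm : s.Perm valid := PySem.List.sorted_perm valid (fun x => x) false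
    have hpw : List.Pairwise (· ≤ ·) s := by
      have := PySem.List.sorted_pairwise valid (fun x => x)
      simpa [hs] using this
    have hInv : pvInv s (s.foldl runStep (v, 0, 0, none)) := by
      have := pvFoldInv s [] (v, 0, 0, none) (by simpa using hpw)
        ⟨fun _ => ⟨rfl, rfl⟩, fun h => absurd rfl h⟩
      simpa using this
    set st := s.foldl runStep (v, 0, 0, none) with hstdef
    set b := st.1 with hb
    obtain ⟨_, _, _, _, _, hbmem, hbcnt, hbmax⟩ := hInv.2 hsne
    have hbval : b ∈ valid := hperm.mem_iff.mp hbmem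
    have hcnt : ∀ x, s.count x = valid.count x := fun x => hperm.count_eq x
    have hlen : s.length = valid.length := hperm.length_eq
    have hbmax2 : ∀ q ∈ valid, (valid.count q : Int) < st.2.1 ∨
        ((valid.count q : Int) = st.2.1 ∧ b ≤ q) := by
      intro q hq
      have := hbmax q (hperm.mem_iff.mpr hq)
      rwa [hcnt] at this
    have hbcnt2 : st.2.1 = (valid.count b : Int) := by rw [hbcnt, hcnt]
    -- the two agreement tests coincide
    have hiff : (PySem.Set.ofList valid).length = 1 ↔ valid.count b = valid.length := by
      constructor
      · intro h1
        obtain ⟨a, ha⟩ := List.length_eq_one_iff.mp h1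
        have hba : b = a := by
          have hm : b ∈ PySem.Set.ofList valid := (PySem.Set.mem_ofList valid b).mpr hbval
          rw [ha] at hm; simpa using hm
        refine List.count_eq_length.mpr ?_
        intro x hx
        have hm : x ∈ PySem.Set.ofList valid := (PySem.Set.mem_ofList valid x).mpr hx
        rw [ha] at hm
        simp at hm
        rw [hba, hm]
      · intro hc
        have hall := List.count_eq_length.mp hc
        have hsub : ∀ x ∈ PySem.Set.ofList valid, x = b := by
          intro x hx
          exact (hall x ((PySem.Set.mem_ofList valid x).mp hx)).symm
        have hnd := PySem.Set.nodup_ofList valid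
        have hSne : PySem.Set.ofList valid ≠ [] := by
          intro h
          have hm : b ∈ PySem.Set.ofList valid := (PySem.Set.mem_ofList valid b).mpr hbval
          rw [h] at hm
          exact List.not_mem_nil hm
        obtain ⟨a0, S2, hS⟩ := List.exists_cons_of_ne_nil hSne
        rw [hS] at hsub hnd ⊢
        have ha0 : a0 = b := hsub a0 List.mem_cons_self
        have hS2nil : S2 = [] := by
          cases S2 with
          | nil => rfl
          | cons a2 r2 =>
            exfalso
            have ha2 : a2 = b := hsub a2 (by simp)
            have hne : a0 ≠ a2 := by
              intro h
              rw [h] at hnd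
              exact (List.nodup_cons.mp hnd).1 (by simp)
            exact hne (ha0.trans ha2.symm)
        simp [hS2nil]
    have hcond : (st.2.1 == (s.length : Int)) = (PySem.Set.len (PySem.Set.ofList valid) == 1) := by
      rw [hbcnt2, hlen]
      apply Bool.eq_iff_iff.mpr
      simp only [beq_iff_eq, PySem.Set.len]
      omega
    rw [if_neg hv, hvt]
    simp only
    rw [← hvt, ← hstdef, hcond]
    by_cases hag : (PySem.Set.len (PySem.Set.ofList valid) == 1) = true
    · rw [if_pos hag, if_pos hag]
      have h1 : (PySem.Set.ofList valid).length = 1 := by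
        have h := beq_iff_eq.mp hag
        simp only [PySem.Set.len] at h
        exact_mod_cast h
      obtain ⟨a, ha⟩ := List.length_eq_one_iff.mp h1
      have hba : b = a := by
        have hm : b ∈ PySem.Set.ofList valid := (PySem.Set.mem_ofList valid b).mpr hbval
        rw [ha] at hm; simpa using hm
      obtain ⟨v0, t0, hvt0⟩ := List.exists_cons_of_ne_nil hv
      have hva : v0 = a := by
        have hm : v0 ∈ PySem.Set.ofList valid :=
          (PySem.Set.mem_ofList valid v0).mpr (hvt0 ▸ List.mem_cons_self)
        rw [ha] at hm; simpa using hm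
      have hget : PySem.List.pyGet? valid 0 = some v0 := by
        rw [hvt0]; exact pvPyGet0 v0 t0
      rw [hget, hva, ← hb, hba]
    · rw [if_neg hag, if_neg hag]
      cases co with
      | true => rfl
      | false =>
        simp only [Bool.false_eq_true, if_false]
        have hcounter : valid.foldl (fun d p => PySem.Dict.modify d p 0 (· + 1)) PySem.Dict.empty
            = PySem.Dict.counter valid := (PySem.Dict.counter_eq_foldl valid).symm
        have hitems : (PySem.Dict.counter valid).items
            = (PySem.Set.ofList valid).map (fun k => (k, ((valid.count k : Nat) : Int))) :=
          PySem.Dict.items_counter valid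
        have hSne : PySem.Set.ofList valid ≠ [] := by
          intro h
          have hm : b ∈ PySem.Set.ofList valid := (PySem.Set.mem_ofList valid b).mpr hbval
          rw [h] at hm
          exact List.not_mem_nil hm
        rw [hcounter, hitems]
        have hmapne : (PySem.Set.ofList valid).map
            (fun k => (k, ((valid.count k : Nat) : Int))) ≠ [] := by
          simpa [List.map_eq_nil_iff] using hSne
        have hsortne : PySem.List.sorted
            ((PySem.Set.ofList valid).map (fun k => (k, ((valid.count k : Nat) : Int))))
            (fun kv => toLex ((-kv.2 : Int), kv.1)) ≠ [] := by
          rw [Ne, PySem.List.sorted_eq_nil_iff]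
          exact hmapne
        obtain ⟨kv, rest, hkv⟩ := List.exists_cons_of_ne_nil hsortne
        have hkvmem : kv ∈ (PySem.Set.ofList valid).map
            (fun k => (k, ((valid.count k : Nat) : Int))) := by
          have hm : kv ∈ PySem.List.sorted
              ((PySem.Set.ofList valid).map (fun k => (k, ((valid.count k : Nat) : Int))))
              (fun kv => toLex ((-kv.2 : Int), kv.1)) := by
            rw [hkv]; exact List.mem_cons_self
          exact (PySem.List.mem_sorted _ _ _ _).mp hm
        obtain ⟨p, hpS, rfl⟩ := List.mem_map.mp hkvmem
        have hbset : b ∈ PySem.Set.ofList valid := (PySem.Set.mem_ofList valid b).mpr hbval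
        have hhead := PySem.List.key_head_sorted_le _ _ hkv
            (b, ((valid.count b : Nat) : Int))
            (List.mem_map.mpr ⟨b, hbset, rfl⟩)
        rw [Prod.Lex.le_iff] at hhead
        simp only [ofLex_toLex] at hhead
        have hmb := hbmax2 p ((PySem.Set.mem_ofList valid p).mp hpS)
        rw [hbcnt2] at hmb
        have hpb : p = b := by
          rcases hhead with h | ⟨h1, h2⟩ <;> rcases hmb with h2 | ⟨h1, h2⟩ <;> omega
        rw [hkv, pvPyGet0]
        simp [hpb, hb]
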